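-- pv_equiv track=rewrite | github.com/Rob12312368/Art_Of_Problem_Solving | solution.py | backtrack
-- ===== SOURCE A (Python) =====
-- def backtrack(p:list, target:int, curval:int, path:list, curindex:tuple):
--     # already bigger than the answer, try another path
--     if curval > target:
--         return
--     # got the answer
--     if curval == target:
--         return "".join(path)
--
--     left = None
--     right = None
--     # go left in the pyramid (down in the list)
--     if curindex[0] + 1 < len(p):
--         path.append('L')
--         left = backtrack(p, target, curval * p[curindex[0]+1][curindex[1]], path,(curindex[0]+1,curindex[1]))
--         path.pop()
--     # go right in the pyramid (down right in the list)
--     if curindex[0] + 1 < len(p) and curindex[1] + 1 < len(p[curindex[0]+1]):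
--         path.append('R')
--         right = backtrack(p, target, curval * p[curindex[0]+1][curindex[1]+1], path,(curindex[0]+1,curindex[1]+1))
--         path.pop()
--     return left or right
-- ===== SOURCE B (Python) =====
-- def backtrack(p: list, target: int, curval: int, path: list, curindex: tuple):
--     # iterative DFS over an explicit stack; right child pushed first so left is explored first
--     stack = [(curindex[0], curindex[1], curval, "".join(path))]
--     while stack:
--         r, c, v, s = stack.pop()
--         if v > target:
--             continue
--         if v == target:
--             return s
--         if r + 1 < len(p):
--             if c + 1 < len(p[r + 1]):
--                 stack.append((r + 1, c + 1, v * p[r + 1][c + 1], s + 'R'))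
--             stack.append((r + 1, c, v * p[r + 1][c], s + 'L'))
--     return None
-- ===== Notes on version B (the rewrite author's own statement) =====
-- stated objective: alternative
-- what changed: The recursive DFS with a mutable shared path list and Python's truthy 'left or right' combiner is replaced by an iterative explicit-stack DFS that carries an immutable path string per frame and pushes the right child before the left so left-first preorder is preserved; …
-- outside the precondition, e.g. on backtrack([[1], [2], [7]], 2, 1, [], (0, 0)): A returns 'L', B returns 'L'; on backtrack([[1], [9], [5]], 3, 1, [], (0, 0)): A returns None, B returns None
import Mathlib
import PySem

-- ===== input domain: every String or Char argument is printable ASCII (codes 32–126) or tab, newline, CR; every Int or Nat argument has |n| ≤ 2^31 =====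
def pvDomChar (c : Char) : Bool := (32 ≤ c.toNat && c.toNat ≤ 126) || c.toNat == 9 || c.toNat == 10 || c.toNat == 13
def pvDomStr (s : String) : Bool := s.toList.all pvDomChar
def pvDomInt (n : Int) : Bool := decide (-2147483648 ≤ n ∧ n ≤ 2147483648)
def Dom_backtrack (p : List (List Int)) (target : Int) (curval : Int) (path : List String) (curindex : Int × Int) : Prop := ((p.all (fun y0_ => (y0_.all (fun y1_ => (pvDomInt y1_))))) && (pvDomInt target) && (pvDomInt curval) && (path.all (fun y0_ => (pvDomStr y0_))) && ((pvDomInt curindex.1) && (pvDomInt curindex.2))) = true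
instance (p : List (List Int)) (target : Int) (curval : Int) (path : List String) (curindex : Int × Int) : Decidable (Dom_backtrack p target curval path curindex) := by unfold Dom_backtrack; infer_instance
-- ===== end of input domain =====

-- B replaces A's recursive DFS (mutable shared path list, truthy 'left or right') by an iterative
-- explicit-stack DFS carrying an immutable path string per frame (right child pushed first, so the
-- left-first preorder and the first-success result are identical); same asymptotic cost.
-- Equivalence is about the RETURN value only: A mutates `path` in place (append/pop) during the
-- search, though it always restores it before returning; B never mutates its arguments.

-- ===== PORT A =====
-- p[r][c] as both Pythons access it (negative indices wrap); the default 0 / [] is only reached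
-- where Python would raise IndexError, which Pre_backtrack excludes.
def pvAt (p : List (List Int)) (r c : Int) : Int :=
  (PySem.List.pyGet? ((PySem.List.pyGet? p r).getD []) c).getD 0

-- len(p[r]) (same wrap/default convention)
def pvRowLen (p : List (List Int)) (r : Int) : Int :=
  (((PySem.List.pyGet? p r).getD []).length : Int)

def backtrack (p : List (List Int)) (target : Int) (curval : Int) (path : List String) (curindex : Int × Int) : Option String :=
  if curval > target then none
  else if curval = target then some (PySem.Str.join "" path)
  else
    let left : Option String :=
      if _h : curindex.1 + 1 < (p.length : Int) then
        backtrack p target (curval * pvAt p (curindex.1 + 1) curindex.2) (path ++ ["L"]) (curindex.1 + 1, curindex.2)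
      else none
    let right : Option String :=
      if _h : curindex.1 + 1 < (p.length : Int) ∧ curindex.2 + 1 < pvRowLen p (curindex.1 + 1) then
        backtrack p target (curval * pvAt p (curindex.1 + 1) (curindex.2 + 1)) (path ++ ["R"]) (curindex.1 + 1, curindex.2 + 1)
      else none
    -- return left or right  (Python truthiness: None and "" are falsy)
    match left with
    | some s => if s = "" then right else some s
    | none => right
termination_by ((p.length : Int) - curindex.1).toNat
decreasing_by all_goals omega

-- ===== PORT B =====
-- the while-stack loop of Source B; frames are (row, col, curval, path string)
def pvLoop (p : List (List Int)) (target : Int) (stack : List (Int × Int × Int × String)) : Option String :=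
  match stack with
  | [] => none
  | (r, c, v, s) :: rest =>
    if v > target then pvLoop p target rest
    else if v = target then some s
    else if _h : r + 1 < (p.length : Int) then
      pvLoop p target ((r + 1, c, v * pvAt p (r + 1) c, s ++ "L") ::
        (if c + 1 < pvRowLen p (r + 1) then
          (r + 1, c + 1, v * pvAt p (r + 1) (c + 1), s ++ "R") :: rest
        else rest))
    else pvLoop p target rest
termination_by (stack.map (fun f => 3 ^ (((p.length : Int) - f.1).toNat))).sum
decreasing_by
  · simp only [List.map_cons, List.sum_cons]
    have : 0 < 3 ^ (((p.length : Int) - r).toNat) := pow_pos (by omega) _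
    omega
  · have hk : ((p.length : Int) - r).toNat = ((p.length : Int) - (r + 1)).toNat + 1 := by omega
    split <;>
    · simp only [List.map_cons, List.sum_cons, hk, pow_succ]
      have : 0 < 3 ^ (((p.length : Int) - (r + 1)).toNat) := pow_pos (by omega) _
      omega
  · simp only [List.map_cons, List.sum_cons]
    have : 0 < 3 ^ (((p.length : Int) - r).toNat) := pow_pos (by omega) _
    omega

def backtrack_alt (p : List (List Int)) (target : Int) (curval : Int) (path : List String) (curindex : Int × Int) : Option String :=
  pvLoop p target [(curindex.1, curindex.2, curval, PySem.Str.join "" path)]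

-- ===== PRECONDITION & SPEC =====
-- Pre_ admits any input the search prunes at the root (curval ≥ target) and otherwise excludes a
-- triangle-shaped over-approximation of IndexError: every row the search could step into must be a
-- valid (possibly wrapping) row index and every column of the start-anchored triangle a valid index
-- into that row; this still excludes some inputs on which A returns because deeper value pruning or
-- the right-child guard stops it before the bad access.
def Pre_backtrack (p : List (List Int)) (target : Int) (curval : Int) (path : List String) (curindex : Int × Int) : Prop :=
  curval ≥ target ∨
  ((curindex.1 + 1 < (p.length : Int) → -(p.length : Int) ≤ curindex.1 + 1) ∧
  ∀ k ∈ PySem.List.pyRange curindex.1 ((p.length : Int) - 1) 1,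
    ∀ c ∈ PySem.List.pyRange curindex.2 (curindex.2 + (k - curindex.1) + 1) 1,
      PySem.Raise.InRange ((PySem.List.pyGet? p (k + 1)).getD []).length c)
instance (p : List (List Int)) (target : Int) (curval : Int) (path : List String) (curindex : Int × Int) : Decidable (Pre_backtrack p target curval path curindex) := by unfold Pre_backtrack; infer_instance

def pvWitness_backtrack : List (List Int) × Int × Int × List String × (Int × Int) :=
  ([[1], [2, 3]], 2, 1, [], (0, 0))

def Spec_backtrack (p : List (List Int)) (target : Int) (curval : Int) (path : List String) (curindex : Int × Int) (out : Option String) : Prop := out = backtrack_alt p target curval path curindex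
instance (p : List (List Int)) (target : Int) (curval : Int) (path : List String) (curindex : Int × Int) (out : Option String) : Decidable (Spec_backtrack p target curval path curindex out) := by unfold Spec_backtrack; infer_instance

-- ===== CLAIM (what is proved, stated in full; the proofs are below) =====
def Claim_equal_backtrack : Prop := ∀ (p : List (List Int)) (target : Int) (curval : Int) (path : List String) (curindex : Int × Int), Dom_backtrack p target curval path curindex → Pre_backtrack p target curval path curindex → Spec_backtrack p target curval path curindex (backtrack p target curval path curindex)

-- ===== LEMMAS AND PROOFS =====

theorem pvCharsJoin_snoc (l : List (List Char)) (x : List Char) :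
    PySem.Chars.join [] (l ++ [x]) = PySem.Chars.join [] l ++ x := by
  induction l with
  | nil => simp [PySem.Chars.join_nil, PySem.Chars.join_singleton]
  | cons a l ih =>
    cases l with
    | nil => simp [PySem.Chars.join_singleton, PySem.Chars.join_cons_cons]
    | cons b l' =>
      have h1 : (a :: b :: l') ++ [x] = a :: ((b :: l') ++ [x]) := rfl
      rw [h1, show (b :: l') ++ [x] = b :: (l' ++ [x]) from rfl]
      rw [PySem.Chars.join_cons_cons, PySem.Chars.join_cons_cons,
        show b :: (l' ++ [x]) = (b :: l') ++ [x] from rfl, ih]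
      simp

theorem pvJoin_snoc (path : List String) (x : String) :
    PySem.Str.join "" (path ++ [x]) = PySem.Str.join "" path ++ x := by
  apply String.toList_inj.mp
  simp [PySem.Str.toList_join, pvCharsJoin_snoc]

theorem pvJoin_singleton (s : String) : PySem.Str.join "" [s] = s := by
  apply String.toList_inj.mp
  simp [PySem.Str.toList_join, PySem.Chars.join_singleton]

-- any result of A is the join of its path argument followed by some tail
theorem pvA_extends (p : List (List Int)) (target : Int) :
    ∀ (n : Nat) (curval : Int) (path : List String) (r c : Int) (s : String),
      ((p.length : Int) - r).toNat ≤ n →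
      backtrack p target curval path (r, c) = some s →
      ∃ tail : String, s = PySem.Str.join "" path ++ tail := by
  intro n
  induction n with
  | zero =>
    intro v path r c s hn hb
    have hr : ¬ (r + 1 < (p.length : Int)) := by omega
    rw [backtrack] at hb
    by_cases h1 : v > target
    · simp [h1] at hb
    · by_cases h2 : v = target
      · simp [h2] at hb
        exact ⟨"", by rw [← hb]; simp⟩
      · simp [h1, h2, hr] at hb
  | succ n ih =>
    intro v path r c s hn hb
    rw [backtrack] at hb
    by_cases h1 : v > target
    · simp [h1] at hb
    · by_cases h2 : v = target
      · simp [h2] at hb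
        exact ⟨"", by rw [← hb]; simp⟩
      · by_cases hL : r + 1 < (p.length : Int)
        · have hm : ((p.length : Int) - (r + 1)).toNat ≤ n := by omega
          simp only [h1, h2, hL, if_false, dite_true, true_and] at hb
          have hright : ∀ s' : String,
              (if _h : c + 1 < pvRowLen p (r + 1) then
                backtrack p target (v * pvAt p (r + 1) (c + 1)) (path ++ ["R"]) (r + 1, c + 1)
              else none) = some s' →
              ∃ tail, s' = PySem.Str.join "" path ++ tail := by
            intro s' hs'
            split at hs'
            · obtain ⟨t, ht⟩ := ih _ _ _ _ _ hm hs'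
              rw [pvJoin_snoc] at ht
              exact ⟨"R" ++ t, by rw [ht, String.append_assoc]⟩
            · simp at hs'
          cases hbl : backtrack p target (v * pvAt p (r + 1) c) (path ++ ["L"]) (r + 1, c) with
          | none =>
            rw [hbl] at hb
            dsimp only at hb
            exact hright s hb
          | some x =>
            rw [hbl] at hb
            dsimp only at hb
            by_cases hx : x = ""
            · rw [if_pos hx] at hb
              exact hright s hb
            · rw [if_neg hx] at hb
              obtain ⟨t, ht⟩ := ih _ _ _ _ _ hm hbl
              rw [pvJoin_snoc] at ht
              have hsx : x = s := by injection hb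
              exact ⟨"L" ++ t, by rw [← hsx, ht, String.append_assoc]⟩
        · have hr := hL
          simp [h1, h2, hr] at hb


-- A's path argument only matters through its join
theorem pvA_join_congr (p : List (List Int)) (target : Int) :
    ∀ (n : Nat) (curval : Int) (path path' : List String) (r c : Int),
      ((p.length : Int) - r).toNat ≤ n →
      PySem.Str.join "" path = PySem.Str.join "" path' →
      backtrack p target curval path (r, c) = backtrack p target curval path' (r, c) := by
  intro n
  induction n with
  | zero =>
    intro v path path' r c hn hj
    have hr : ¬ (r + 1 < (p.length : Int)) := by omega
    conv_lhs => rw [backtrack]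
    conv_rhs => rw [backtrack]
    simp [hr, hj]
  | succ n ih =>
    intro v path path' r c hn hj
    conv_lhs => rw [backtrack]
    conv_rhs => rw [backtrack]
    by_cases h1 : v > target
    · simp [h1]
    by_cases h2 : v = target
    · simp [h2, hj]
    by_cases hL : r + 1 < (p.length : Int)
    · have hm : ((p.length : Int) - (r + 1)).toNat ≤ n := by omega
      have hjL : PySem.Str.join "" (path ++ ["L"]) = PySem.Str.join "" (path' ++ ["L"]) := by
        rw [pvJoin_snoc, pvJoin_snoc, hj]
      have hjR : PySem.Str.join "" (path ++ ["R"]) = PySem.Str.join "" (path' ++ ["R"]) := by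
        rw [pvJoin_snoc, pvJoin_snoc, hj]
      have e1 := ih (v * pvAt p (r + 1) c) (path ++ ["L"]) (path' ++ ["L"]) (r + 1) c hm hjL
      have e2 := ih (v * pvAt p (r + 1) (c + 1)) (path ++ ["R"]) (path' ++ ["R"]) (r + 1) (c + 1) hm hjR
      simp only [h1, h2, if_false]
      rw [e1, e2]
    · simp [h1, h2, hL]

-- the stack loop processes its top frame exactly as A would, then falls through to the rest
theorem pvLoop_frame (p : List (List Int)) (target : Int) :
    ∀ (n : Nat) (v r c : Int) (s : String) (rest : List (Int × Int × Int × String)),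
      ((p.length : Int) - r).toNat ≤ n →
      pvLoop p target ((r, c, v, s) :: rest) =
        (match backtrack p target v [s] (r, c) with
          | some x => some x
          | none => pvLoop p target rest) := by
  intro n
  induction n with
  | zero =>
    intro v r c s rest hn
    have hr : ¬ (r + 1 < (p.length : Int)) := by omega
    conv_lhs => rw [pvLoop]
    conv_rhs => rw [backtrack]
    by_cases h1 : v > target
    · simp [h1]
    by_cases h2 : v = target
    · simp [h2, pvJoin_singleton]
    simp [h1, h2, hr]
  | succ n ih =>
    intro v r c s rest hn
    conv_lhs => rw [pvLoop]
    conv_rhs => rw [backtrack]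
    by_cases h1 : v > target
    · simp [h1]
    by_cases h2 : v = target
    · simp [h2, pvJoin_singleton]
    by_cases hL : r + 1 < (p.length : Int)
    · have hm : ((p.length : Int) - (r + 1)).toNat ≤ n := by omega
      have cjL : backtrack p target (v * pvAt p (r + 1) c) ([s] ++ ["L"]) (r + 1, c) =
          backtrack p target (v * pvAt p (r + 1) c) [s ++ "L"] (r + 1, c) :=
        pvA_join_congr p target n _ _ _ _ _ hm
          (by rw [pvJoin_snoc, pvJoin_singleton, pvJoin_singleton])
      have cjR : backtrack p target (v * pvAt p (r + 1) (c + 1)) ([s] ++ ["R"]) (r + 1, c + 1) =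
          backtrack p target (v * pvAt p (r + 1) (c + 1)) [s ++ "R"] (r + 1, c + 1) :=
        pvA_join_congr p target n _ _ _ _ _ hm
          (by rw [pvJoin_snoc, pvJoin_singleton, pvJoin_singleton])
      have hne : ∀ x, backtrack p target (v * pvAt p (r + 1) c) [s ++ "L"] (r + 1, c) = some x →
          ¬ x = "" := by
        intro x hx hxe
        obtain ⟨t, ht⟩ := pvA_extends p target n _ _ _ _ _ hm hx
        rw [pvJoin_singleton] at ht
        have := congrArg String.toList ht
        simp [hxe] at this
      simp only [h1, h2, hL, if_false, dite_true, true_and]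
      simp only [List.singleton_append]
      simp only [List.singleton_append] at cjL cjR
      rw [cjL, cjR]
      rw [ih (v * pvAt p (r + 1) c) (r + 1) c (s ++ "L") _ hm]
      set lb := backtrack p target (v * pvAt p (r + 1) c) [s ++ "L"] (r + 1, c) with hbl
      clear_value lb
      cases lb with
      | some x =>
        have hx := hne x rfl
        simp [hx]
      | none =>
        by_cases hC : c + 1 < pvRowLen p (r + 1)
        · simp only [hC, if_true, dite_true]
          rw [ih (v * pvAt p (r + 1) (c + 1)) (r + 1) (c + 1) (s ++ "R") rest hm]
        · simp [hC]
    · simp [h1, h2, hL]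

-- ===== VERDICT (by name: the statement is the Claim_ definition above) =====
theorem backtrack_spec : Claim_equal_backtrack := by
  intro p target curval path curindex _hdom _hpre
  unfold Spec_backtrack backtrack_alt
  obtain ⟨r, c⟩ := curindex
  rw [pvLoop_frame p target ((p.length : Int) - r).toNat curval r c (PySem.Str.join "" path) []
    le_rfl]
  have h2 : backtrack p target curval path (r, c) =
      backtrack p target curval [PySem.Str.join "" path] (r, c) :=
    pvA_join_congr p target ((p.length : Int) - r).toNat curval path [PySem.Str.join "" path] r c
      le_rfl (by rw [pvJoin_singleton])
  rw [← h2]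
  cases hb : backtrack p target curval path (r, c) with
  | none => simp [pvLoop]
  | some x => simp
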